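-- pv_equiv track=rewrite | github.com/penowa/glados-planner | ui/views/review_workspace.py | _has_ancestor
-- ===== SOURCE A (Python) =====
-- from collections import deque
-- from typing import Any, Dict, List, Optional
--
-- def _has_ancestor(
--
--     node_id: str,
--     ancestor_id: str,
--     incoming_by_id: Dict[str, set[str]],
-- ) -> bool:
--     start = str(node_id or "").strip()
--     target = str(ancestor_id or "").strip()
--     if not start or not target:
--         return False
--     if start == target:
--         return True
--
--     queue = deque(incoming_by_id.get(start, set()))
--     visited = {start}
--     while queue:
--         current = str(queue.popleft() or "").strip()
--         if not current or current in visited: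
--             continue
--         if current == target:
--             return True
--         visited.add(current)
--         for parent in incoming_by_id.get(current, set()):
--             if parent not in visited:
--                 queue.append(parent)
--     return False
-- ===== SOURCE B (Python) =====
-- def _has_ancestor(node_id, ancestor_id, incoming_by_id):
--     # Round-based fixpoint closure: repeatedly expand the whole reachable set
--     # until it stops growing, then test membership (no queue, no early exit).
--     start = str(node_id or "").strip()
--     target = str(ancestor_id or "").strip()
--     if not start or not target:
--         return False
--     reach = {start}
--     while True:
--         new = set(reach)
--         for n in reach:
--             for p in incoming_by_id.get(n, set()):
--                 q = str(p or "").strip()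
--                 if q:
--                     new.add(q)
--         if len(new) == len(reach):
--             return target in reach
--         reach = new
-- ===== Notes on version B (the rewrite author's own statement) =====
-- stated objective: alternative
-- what changed: Replaces A's early-exit BFS over an explicit deque+visited set by a round-based fixpoint computation: B repeatedly expands the whole set of reachable (stripped, non-empty) ids until it stops growing and only then tests membership of the target, with no queue, no per-node early return and no start==target special case.
import Mathlib
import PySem

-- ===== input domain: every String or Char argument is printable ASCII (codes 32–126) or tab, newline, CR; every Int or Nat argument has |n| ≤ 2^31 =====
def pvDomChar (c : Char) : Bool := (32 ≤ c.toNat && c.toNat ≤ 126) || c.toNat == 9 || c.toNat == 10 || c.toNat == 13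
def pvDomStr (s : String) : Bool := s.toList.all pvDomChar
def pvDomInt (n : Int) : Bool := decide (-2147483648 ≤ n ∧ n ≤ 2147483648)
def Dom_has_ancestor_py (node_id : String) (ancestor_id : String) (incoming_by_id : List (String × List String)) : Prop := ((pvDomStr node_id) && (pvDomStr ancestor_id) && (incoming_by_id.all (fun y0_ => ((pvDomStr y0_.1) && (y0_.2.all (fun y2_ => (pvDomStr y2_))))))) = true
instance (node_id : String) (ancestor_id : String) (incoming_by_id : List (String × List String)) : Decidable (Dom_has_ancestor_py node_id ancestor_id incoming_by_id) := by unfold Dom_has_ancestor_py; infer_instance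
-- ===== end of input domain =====

-- B replaces A's early-exit BFS queue by a round-based fixpoint closure of the whole
-- reachable set (objective: alternative algorithm, same observable return value).

-- ===== PORT A =====
-- shared helper: Python's `str(x or "").strip()` on a str argument
def pvStrip (s : String) : String := PySem.Str.strip (if s = "" then "" else s)

-- all strings occurring in the dict's value sets; `pvU` is the finite universe every
-- visited/reach element lives in (used only by the termination proofs of both loops)
def pvVals (d : List (String × List String)) : List String := (d.map Prod.snd).flatten

def pvU (d : List (String × List String)) (start : String) : List String :=
  start :: (pvVals d).map pvStrip

-- lemmas the ports' termination proofs cite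
theorem pv_nodup_length_le {l U : List String} (h : l.Nodup) (hs : ∀ x ∈ l, x ∈ U) :
    l.length ≤ U.toFinset.card := by
  calc l.length = l.toFinset.card := (List.toFinset_card_of_nodup h).symm
    _ ≤ U.toFinset.card := Finset.card_le_card (fun x hx => by
        simp only [List.mem_toFinset] at *; exact hs x hx)

theorem pv_mem_getD_vals {d : List (String × List String)} {n x : String}
    (hx : x ∈ (PySem.Dict.mk d).getD n []) : x ∈ pvVals d := by
  induction d with
  | nil => simp [PySem.Dict.getD, PySem.Dict.get?] at hx
  | cons kv rest ih =>
    obtain ⟨k, v⟩ := kv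
    rw [PySem.Dict.getD_eq_get?_getD, PySem.Dict.get?_mk_cons] at hx
    by_cases hk : (k == n) = true
    · simp only [hk, if_pos] at hx
      simp only [Option.getD_some] at hx
      simp only [pvVals, List.map_cons, List.flatten_cons, List.mem_append]
      exact Or.inl hx
    · simp only [hk, if_neg, Bool.false_eq_true, not_false_iff] at hx
      have : x ∈ (PySem.Dict.mk rest).getD n [] := by
        rw [PySem.Dict.getD_eq_get?_getD]; exact hx
      have := ih this
      simp only [pvVals, List.map_cons, List.flatten_cons, List.mem_append]
      exact Or.inr (by simpa [pvVals] using this)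

-- transliteration of A's BFS while-loop (proof arguments only serve termination)
def has_ancestor_aux (d : List (String × List String)) (target start : String)
    (queue visited : List String)
    (hq : ∀ x ∈ queue, x ∈ pvVals d)
    (hnd : visited.Nodup)
    (hv : ∀ v ∈ visited, v ∈ pvU d start) : Bool :=
  match queue with
  | [] => false
  | x :: rest =>
    let cur := pvStrip x
    if hc : cur = "" ∨ cur ∈ visited then
      has_ancestor_aux d target start rest visited
        (fun y hy => hq y (List.mem_cons_of_mem _ hy)) hnd hv
    else if cur = target then
      true
    else
      has_ancestor_aux d target start
        (rest ++ ((PySem.Dict.mk d).getD cur []).filter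
          (fun p => !((visited ++ [cur]).contains p)))
        (visited ++ [cur])
        (by
          intro y hy
          rcases List.mem_append.1 hy with h | h
          · exact hq y (List.mem_cons_of_mem _ h)
          · exact pv_mem_getD_vals (List.mem_of_mem_filter h))
        (by
          have hcv : cur ∉ visited := fun h => hc (Or.inr h)
          exact hnd.append (List.nodup_singleton _)
            (by simp [List.disjoint_singleton, hcv]))
        (by
          intro v hv'
          rcases List.mem_append.1 hv' with h | h
          · exact hv v h
          · have hx : x ∈ pvVals d := hq x List.mem_cons_self
            have hveq : v = cur := by simpa using h
            subst hveq
            exact List.mem_cons_of_mem _ (List.mem_map_of_mem hx))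
  termination_by ((pvU d start).toFinset.card + 1 - visited.length, queue.length)
  decreasing_by
  · exact Prod.Lex.right _ (by simp only [List.length_cons]; omega)
  · apply Prod.Lex.left
    have h1 : visited.length ≤ (pvU d start).toFinset.card := pv_nodup_length_le hnd hv
    simp only [List.length_append, List.length_cons, List.length_nil]
    omega

def has_ancestor_py (node_id : String) (ancestor_id : String)
    (incoming_by_id : List (String × List String)) : Bool :=
  let start := pvStrip node_id
  let target := pvStrip ancestor_id
  if start = "" ∨ target = "" then false
  else if start = target then true
  else
    has_ancestor_aux incoming_by_id target start
      ((PySem.Dict.mk incoming_by_id).getD start []) [start]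
      (fun _ hy => pv_mem_getD_vals hy)
      (List.nodup_singleton _)
      (by intro v hv; simp only [List.mem_singleton] at hv; subst hv
          exact List.mem_cons_self)

-- ===== PORT B =====
-- one parent processed: `q = str(p or "").strip(); if q: new.add(q)`
def pvAdd (acc : List String) (p : String) : List String :=
  if pvStrip p = "" then acc else PySem.Set.add acc (pvStrip p)

-- one full round: `new = set(reach); for n in reach: for p in get(n): …`
def pvStep (d : List (String × List String)) (reach : List String) : List String :=
  reach.foldl (fun acc n => ((PySem.Dict.mk d).getD n []).foldl pvAdd acc) reach

-- lemmas the B-loop's termination proof cites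
theorem pvAdd_prefix (acc : List String) (p : String) : acc <+: pvAdd acc p := by
  unfold pvAdd PySem.Set.add
  split
  · exact List.prefix_rfl
  · split
    · exact List.prefix_rfl
    · exact List.prefix_append _ _

theorem pv_foldl_prefix {β : Type} (f : List String → β → List String)
    (h : ∀ a b, a <+: f a b) : ∀ (l : List β) (a : List String), a <+: l.foldl f a := by
  intro l
  induction l with
  | nil => intro a; exact List.prefix_rfl
  | cons b t ih => intro a; exact (h a b).trans (ih (f a b))

theorem pvStep_prefix (d : List (String × List String)) (reach : List String) :
    reach <+: pvStep d reach :=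
  pv_foldl_prefix _ (fun a _ => pv_foldl_prefix pvAdd pvAdd_prefix _ a) reach reach

theorem pvAdd_mem {acc : List String} {p x : String} (hx : x ∈ pvAdd acc p) :
    x ∈ acc ∨ (x = pvStrip p ∧ pvStrip p ≠ "") := by
  unfold pvAdd at hx
  by_cases h : pvStrip p = ""
  · simp only [h, if_pos] at hx; exact Or.inl hx
  · simp only [h, if_neg, not_false_iff] at hx
    rcases (PySem.Set.mem_add _ _ _).1 hx with h' | h'
    · exact Or.inl h'
    · exact Or.inr ⟨h', h⟩

theorem pv_mem_foldl_pvAdd {l acc : List String} {x : String}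
    (hx : x ∈ l.foldl pvAdd acc) :
    x ∈ acc ∨ ∃ p ∈ l, x = pvStrip p ∧ pvStrip p ≠ "" := by
  induction l generalizing acc with
  | nil => exact Or.inl hx
  | cons p t ih =>
    rcases ih (acc := pvAdd acc p) hx with h | ⟨p', hp', h⟩
    · rcases pvAdd_mem h with h | h
      · exact Or.inl h
      · exact Or.inr ⟨p, List.mem_cons_self, h⟩
    · exact Or.inr ⟨p', List.mem_cons_of_mem _ hp', h⟩

theorem pv_mem_pvStep {d : List (String × List String)} {reach : List String} {x : String}
    (hx : x ∈ pvStep d reach) :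
    x ∈ reach ∨ ∃ n ∈ reach, ∃ p ∈ (PySem.Dict.mk d).getD n [],
      x = pvStrip p ∧ pvStrip p ≠ "" := by
  unfold pvStep at hx
  have main : ∀ (l acc : List String),
      x ∈ l.foldl (fun acc n => ((PySem.Dict.mk d).getD n []).foldl pvAdd acc) acc →
      x ∈ acc ∨ ∃ n ∈ l, ∃ p ∈ (PySem.Dict.mk d).getD n [],
        x = pvStrip p ∧ pvStrip p ≠ "" := by
    intro l
    induction l with
    | nil => intro acc h; exact Or.inl h
    | cons n t ih =>
      intro acc h
      rcases ih _ h with h' | ⟨n', hn', h'⟩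
      · rcases pv_mem_foldl_pvAdd h' with h'' | ⟨p, hp, h''⟩
        · exact Or.inl h''
        · exact Or.inr ⟨n, List.mem_cons_self, p, hp, h''⟩
      · exact Or.inr ⟨n', List.mem_cons_of_mem _ hn', h'⟩
  exact main reach reach hx

theorem pvAdd_nodup {acc : List String} (h : acc.Nodup) (p : String) :
    (pvAdd acc p).Nodup := by
  unfold pvAdd
  split
  · exact h
  · exact PySem.Set.nodup_add _ _ h

theorem pv_foldl_pvAdd_nodup {l acc : List String} (h : acc.Nodup) :
    (l.foldl pvAdd acc).Nodup := by
  induction l generalizing acc with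
  | nil => exact h
  | cons p t ih => exact ih (pvAdd_nodup h p)

theorem pvStep_nodup {d : List (String × List String)} {reach : List String}
    (h : reach.Nodup) : (pvStep d reach).Nodup := by
  unfold pvStep
  have main : ∀ (l acc : List String), acc.Nodup →
      (l.foldl (fun acc n => ((PySem.Dict.mk d).getD n []).foldl pvAdd acc) acc).Nodup := by
    intro l
    induction l with
    | nil => intro acc h; exact h
    | cons n t ih => intro acc h; exact ih _ (pv_foldl_pvAdd_nodup h)
  exact main reach reach h

theorem pvStep_sub {d : List (String × List String)} {start : String} {reach : List String}
    (h : ∀ x ∈ reach, x ∈ pvU d start) : ∀ x ∈ pvStep d reach, x ∈ pvU d start := by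
  intro x hx
  rcases pv_mem_pvStep hx with h' | ⟨n, _, p, hp, hx', _⟩
  · exact h x h'
  · subst hx'
    exact List.mem_cons_of_mem _ (List.mem_map_of_mem (pv_mem_getD_vals hp))

-- transliteration of B's `while True` round loop (proof arguments only serve termination)
def has_ancestor_alt_aux (d : List (String × List String)) (target start : String)
    (reach : List String) (hnd : reach.Nodup)
    (hs : ∀ x ∈ reach, x ∈ pvU d start) : Bool :=
  let new := pvStep d reach
  if _hlen : new.length = reach.length then reach.contains target
  else
    has_ancestor_alt_aux d target start new (pvStep_nodup hnd) (pvStep_sub hs)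
  termination_by (pvU d start).toFinset.card + 1 - reach.length
  decreasing_by
    have h1 : reach.length ≤ (pvU d start).toFinset.card := pv_nodup_length_le hnd hs
    have h2 : reach.length ≤ (pvStep d reach).length := (pvStep_prefix d reach).length_le
    have h3 : new.length = (pvStep d reach).length := rfl
    omega

def has_ancestor_py_alt (node_id : String) (ancestor_id : String)
    (incoming_by_id : List (String × List String)) : Bool :=
  let start := pvStrip node_id
  let target := pvStrip ancestor_id
  if start = "" ∨ target = "" then false
  else
    has_ancestor_alt_aux incoming_by_id target start [start]
      (List.nodup_singleton _)
      (by intro v hv; simp only [List.mem_singleton] at hv; subst hv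
          exact List.mem_cons_self)

-- ===== PRECONDITION & SPEC =====
def Spec_has_ancestor_py (node_id : String) (ancestor_id : String) (incoming_by_id : List (String × List String)) (out : Bool) : Prop := out = has_ancestor_py_alt node_id ancestor_id incoming_by_id
instance (node_id : String) (ancestor_id : String) (incoming_by_id : List (String × List String)) (out : Bool) : Decidable (Spec_has_ancestor_py node_id ancestor_id incoming_by_id out) := by unfold Spec_has_ancestor_py; infer_instance

-- ===== CLAIM (what is proved, stated in full; the proofs are below) =====
def Claim_equal_has_ancestor_py : Prop := ∀ (node_id : String) (ancestor_id : String) (incoming_by_id : List (String × List String)), Dom_has_ancestor_py node_id ancestor_id incoming_by_id → Spec_has_ancestor_py node_id ancestor_id incoming_by_id (has_ancestor_py node_id ancestor_id incoming_by_id)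

-- ===== LEMMAS AND PROOFS =====

-- the (stripped, non-empty) parent relation both programs traverse, and reachability
def pvRel (d : List (String × List String)) (x y : String) : Prop :=
  y ≠ "" ∧ ∃ p ∈ (PySem.Dict.mk d).getD x [], pvStrip p = y

def pvReach (d : List (String × List String)) (s t : String) : Prop :=
  Relation.ReflTransGen (pvRel d) s t

theorem pvStrip_eq (s : String) : pvStrip s = PySem.Str.strip s := by
  unfold pvStrip; split_ifs with h
  · rw [h]
  · rfl

theorem pv_dropWhile_prefix_eq {p : Char → Bool} {w u : List Char} (hw : w <+: u)
    (hu : List.dropWhile p u = u) : List.dropWhile p w = w := by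
  cases w with
  | nil => simp
  | cons c t =>
    have hc : p c = false := by
      by_contra hpc
      have hpc' : p c = true := by revert hpc; cases p c <;> simp
      obtain ⟨r, hr⟩ := hw
      rw [← hr] at hu
      rw [List.cons_append, List.dropWhile_cons, if_pos hpc'] at hu
      have hlen := congrArg List.length hu
      have hle := List.length_dropWhile_le p (t ++ r)
      simp only [List.length_cons, List.length_append] at hlen hle
      omega
    simp [hc]

theorem pv_chars_strip_idem (l : List Char) :
    PySem.Chars.strip (PySem.Chars.strip l) = PySem.Chars.strip l := by
  unfold PySem.Chars.strip PySem.Chars.lstrip PySem.Chars.rstrip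
  set p := PySem.Chars.isspace with hp
  set u := List.dropWhile p l with hu
  set v := (List.dropWhile p u.reverse).reverse with hv
  have hu_fix : List.dropWhile p u = u := by rw [hu]; exact List.dropWhile_idempotent p l
  have hvu : v <+: u := by
    rw [← List.reverse_suffix]
    rw [hv, List.reverse_reverse]
    exact List.dropWhile_suffix p
  have hv_fix : List.dropWhile p v = v := pv_dropWhile_prefix_eq hvu hu_fix
  rw [hv_fix, hv, List.reverse_reverse, List.dropWhile_idempotent]

theorem pvStrip_idem (s : String) : pvStrip (pvStrip s) = pvStrip s := by
  rw [pvStrip_eq, pvStrip_eq]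
  show String.ofList (PySem.Chars.strip (PySem.Str.strip s).toList) = _
  rw [PySem.Str.toList_strip, pv_chars_strip_idem]
  rfl

-- append-only folds that return their initial list added nothing along the way
theorem pv_foldl_fix {β : Type} (f : List String → β → List String)
    (hp : ∀ a b, a <+: f a b) :
    ∀ (l : List β) (a : List String), l.foldl f a = a → ∀ b ∈ l, f a b = a := by
  intro l
  induction l with
  | nil => intro a _ b hb; cases hb
  | cons b t ih =>
    intro a hfix c hc
    rw [List.foldl_cons] at hfix
    have h1 : a <+: f a b := hp a b
    have h2 : f a b <+: t.foldl f (f a b) := pv_foldl_prefix f hp t (f a b)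
    rw [hfix] at h2
    have heq : f a b = a := h2.eq_of_length (le_antisymm h2.length_le h1.length_le)
    rcases List.mem_cons.1 hc with rfl | hc
    · exact heq
    · exact ih a (by rw [heq] at hfix; exact hfix) c hc

theorem pvAdd_fix {acc : List String} {p : String} (h : pvAdd acc p = acc) :
    pvStrip p = "" ∨ pvStrip p ∈ acc := by
  by_cases hq : pvStrip p = ""
  · exact Or.inl hq
  · right
    by_contra hmem
    have hadd : pvAdd acc p = acc ++ [pvStrip p] := by
      simp [pvAdd, hq, PySem.Set.add_of_not_mem hmem]
    rw [hadd] at h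
    have := congrArg List.length h
    simp at this

theorem pvStep_fix {d : List (String × List String)} {reach : List String}
    (h : pvStep d reach = reach) :
    ∀ n ∈ reach, ∀ y, pvRel d n y → y ∈ reach := by
  intro n hn y hy
  obtain ⟨hy0, p, hp, hpy⟩ := hy
  unfold pvStep at h
  have houter := pv_foldl_fix _
    (fun a b => pv_foldl_prefix pvAdd pvAdd_prefix ((PySem.Dict.mk d).getD b []) a)
    reach reach h n hn
  have hinner := pv_foldl_fix pvAdd pvAdd_prefix _ reach houter p hp
  rcases pvAdd_fix hinner with h' | h'
  · exact absurd (h' ▸ hpy).symm hy0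
  · rwa [hpy] at h'

-- B's round loop answers exactly reachability
theorem pv_alt_aux_iff (d : List (String × List String)) (target start : String) :
    ∀ (reach : List String) (hnd : reach.Nodup) (hs : ∀ x ∈ reach, x ∈ pvU d start),
      start ∈ reach → (∀ x ∈ reach, pvReach d start x) →
      (has_ancestor_alt_aux d target start reach hnd hs = true ↔ pvReach d start target) := by
  intro reach hnd hs
  induction reach, hnd, hs using has_ancestor_alt_aux.induct with
  | case1 reach hnd hs new hlen =>
    intro hstart hinv
    rw [has_ancestor_alt_aux]
    split
    case isFalse h => exact absurd hlen h
    have hfix : pvStep d reach = reach :=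
      ((pvStep_prefix d reach).eq_of_length hlen.symm).symm
    have hclosed := pvStep_fix hfix
    rw [List.contains_iff_mem]
    constructor
    · intro h; exact hinv target h
    · intro h
      induction h with
      | refl => exact hstart
      | tail h₁ h₂ ih => exact hclosed _ ih _ h₂
  | case2 reach hnd hs new hlen ih =>
    intro hstart hinv
    rw [has_ancestor_alt_aux]
    split
    case isTrue h => exact absurd h hlen
    apply ih
    · exact (pvStep_prefix d reach).subset hstart
    · intro x hx
      rcases pv_mem_pvStep hx with h | ⟨n, hn, p, hp, hx', hne⟩
      · exact hinv x h
      · subst hx'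
        exact (hinv n hn).tail ⟨hne, p, hp, rfl⟩

-- A's BFS loop answers exactly reachability (six-part loop invariant)
set_option maxHeartbeats 2000000 in
theorem pv_aux_iff (d : List (String × List String)) (target start : String) :
    ∀ (queue visited : List String) (hq : ∀ x ∈ queue, x ∈ pvVals d)
      (hnd : visited.Nodup) (hv : ∀ v ∈ visited, v ∈ pvU d start),
      (∀ x ∈ queue, pvStrip x = "" ∨ pvReach d start (pvStrip x)) →
      (∀ v ∈ visited, pvReach d start v) →
      start ∈ visited →
      target ∉ visited →
      (∀ v ∈ visited, pvStrip v = v) →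
      (∀ v ∈ visited, ∀ y, pvRel d v y → y ∈ visited ∨ ∃ x ∈ queue, pvStrip x = y) →
      (has_ancestor_aux d target start queue visited hq hnd hv = true ↔ pvReach d start target) := by
  intro queue visited hq hnd hv
  induction queue, visited, hq, hnd, hv using has_ancestor_aux.induct with
  | target => exact target
  | case1 visited hnd hv hq hq2 =>
    intro _ _ hstart htgt _ hclosed
    rw [has_ancestor_aux]
    simp only [Bool.false_eq_true, false_iff]
    intro h
    have hall : ∀ c, pvReach d start c → c ∈ visited := by
      intro c hc
      induction hc with
      | refl => exact hstart
      | tail h₁ h₂ ih =>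
        rcases hclosed _ ih _ h₂ with h' | ⟨x, hx, _⟩
        · exact h'
        · cases hx
    exact htgt (hall target h)
  | case2 visited hnd hv x rest hq cur hc hq2 ih =>
    intro hinvq hinvv hstart htgt hfixed hclosed
    have hc' : pvStrip x = "" ∨ pvStrip x ∈ visited := hc
    have hrec := ih
      (fun y hy => hinvq y (List.mem_cons_of_mem _ hy))
      hinvv hstart htgt hfixed
      (by
        have hcd : cur = pvStrip x := rfl
        try simp only [hcd]
        intro v hv' y hrel
        rcases hclosed v hv' y hrel with h | ⟨x', hx', hxy⟩
        · exact Or.inl h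
        · rcases List.mem_cons.1 hx' with hx'' | hx''
          · subst hx''
            rcases hc' with hc'' | hc''
            · exact absurd (hxy ▸ hc'') hrel.1
            · exact Or.inl (hxy ▸ hc'')
          · exact Or.inr ⟨x', hx'', hxy⟩)
    rw [has_ancestor_aux]
    split
    · exact hrec
    · exact hrec
  | case3 visited hnd hv x rest hq cur hc heq hq2 =>
    intro hinvq hinvv hstart htgt hfixed hclosed
    rw [has_ancestor_aux]
    split
    · next h => exact absurd h hc
    · refine iff_of_true rfl ?_
      rcases hinvq x List.mem_cons_self with h | h
      · exact absurd h (fun h' => hc (Or.inl h'))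
      · exact (show pvStrip x = target from heq) ▸ h
  | case4 visited hnd hv x rest hq cur hc hne hq2 ih =>
    intro hinvq hinvv hstart htgt hfixed hclosed
    have hcur0 : pvStrip x ≠ "" := fun h' => hc (Or.inl h')
    have hcurR : pvReach d start (pvStrip x) := by
      rcases hinvq x List.mem_cons_self with h | h
      · exact absurd h hcur0
      · exact h
    have hcd : cur = pvStrip x := rfl
    have hrec := ih
      (by
        -- queue invariant
        simp only [hcd]
        intro y hy
        rcases List.mem_append.1 hy with h | h
        · exact hinvq y (List.mem_cons_of_mem _ h)
        · have hyp : y ∈ (PySem.Dict.mk d).getD (pvStrip x) [] := List.mem_of_mem_filter h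
          by_cases h0 : pvStrip y = ""
          · exact Or.inl h0
          · exact Or.inr (hcurR.tail ⟨h0, y, hyp, rfl⟩))
      (by
        -- visited all reachable
        simp only [hcd]
        intro v hv'
        rcases List.mem_append.1 hv' with h | h
        · exact hinvv v h
        · have hv'' : v = pvStrip x := by simpa using h
          exact hv'' ▸ hcurR)
      (List.mem_append.2 (Or.inl hstart))
      (by
        -- target still not visited
        simp only [hcd]
        intro h
        rcases List.mem_append.1 h with h | h
        · exact htgt h
        · have h' : target = pvStrip x := by simpa using h
          exact (show ¬pvStrip x = target from hne) h'.symm)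
      (by
        -- visited stays strip-fixed
        simp only [hcd]
        intro v hv'
        rcases List.mem_append.1 hv' with h | h
        · exact hfixed v h
        · have hv'' : v = pvStrip x := by simpa using h
          subst hv''; exact pvStrip_idem x)
      (by
        -- closure invariant
        simp only [hcd]
        intro v hv' y hrel
        rcases List.mem_append.1 hv' with h | h
        · rcases hclosed v h y hrel with h' | ⟨x', hx', hxy⟩
          · exact Or.inl (List.mem_append.2 (Or.inl h'))
          · rcases List.mem_cons.1 hx' with hx'' | hx''
            · subst hx''
              exact Or.inl (List.mem_append.2 (Or.inr (by simp [hxy])))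
            · exact Or.inr ⟨x', List.mem_append.2 (Or.inl hx''), hxy⟩
        · -- v is the freshly expanded node
          have hvc : v = pvStrip x := by simpa using h
          subst hvc
          obtain ⟨hy0, p, hp, hpy⟩ := hrel
          by_cases hpv : p ∈ visited ++ [pvStrip x]
          · -- p already visited, hence strip-fixed: y = strip p = p
            have hpfix : pvStrip p = p := by
              rcases List.mem_append.1 hpv with h' | h'
              · exact hfixed p h'
              · have hp' : p = pvStrip x := by simpa using h'
                subst hp'; exact pvStrip_idem x
            have hyv : y ∈ visited ++ [pvStrip x] := by
              rw [← hpy, hpfix]; exact hpv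
            exact Or.inl hyv
          · right
            refine ⟨p, List.mem_append.2 (Or.inr ?_), hpy⟩
            refine List.mem_filter.2 ⟨hp, ?_⟩
            simp only [Bool.not_eq_true', ← Bool.not_eq_true, List.contains_iff_mem]
            simpa using hpv)
    rw [has_ancestor_aux]
    split
    · next h => exact absurd h hc
    · exact hrec

-- ===== VERDICT (by name: the statement is the Claim_ definition above) =====
theorem has_ancestor_py_spec : Claim_equal_has_ancestor_py := by
  unfold Claim_equal_has_ancestor_py
  intro node_id ancestor_id d _hdom
  simp only [Spec_has_ancestor_py, has_ancestor_py, has_ancestor_py_alt]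
  by_cases h0 : pvStrip node_id = "" ∨ pvStrip ancestor_id = ""
  · simp [h0]
  · rw [if_neg h0, if_neg h0]
    have hBiff := pv_alt_aux_iff d (pvStrip ancestor_id) (pvStrip node_id)
      [pvStrip node_id] (List.nodup_singleton _)
      (by intro v hv; simp only [List.mem_singleton] at hv; subst hv
          exact List.mem_cons_self)
      (List.mem_singleton_self _)
      (by intro x hx
          have hx' : x = pvStrip node_id := by simpa using hx
          subst hx'; exact Relation.ReflTransGen.refl)
    by_cases hst : pvStrip node_id = pvStrip ancestor_id
    · rw [if_pos hst]
      have hr : pvReach d (pvStrip node_id) (pvStrip ancestor_id) := by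
        rw [← hst]
        exact Relation.ReflTransGen.refl
      exact (hBiff.2 hr).symm
    · rw [if_neg hst]
      have hAiff := pv_aux_iff d (pvStrip ancestor_id) (pvStrip node_id)
        ((PySem.Dict.mk d).getD (pvStrip node_id) []) [pvStrip node_id]
        (fun _ hy => pv_mem_getD_vals hy) (List.nodup_singleton _)
        (by intro v hv; simp only [List.mem_singleton] at hv; subst hv
            exact List.mem_cons_self)
        (by intro x hx
            by_cases hxe : pvStrip x = ""
            · exact Or.inl hxe
            · exact Or.inr (Relation.ReflTransGen.single ⟨hxe, x, hx, rfl⟩))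
        (by intro v hv
            have hv' : v = pvStrip node_id := by simpa using hv
            subst hv'; exact Relation.ReflTransGen.refl)
        (List.mem_singleton_self _)
        (by intro h
            have h' : pvStrip ancestor_id = pvStrip node_id := by simpa using h
            exact hst h'.symm)
        (by intro v hv
            have hv' : v = pvStrip node_id := by simpa using hv
            subst hv'; exact pvStrip_idem node_id)
        (by intro v hv y hrel
            have hvs : v = pvStrip node_id := by simpa using hv
            subst hvs
            obtain ⟨hy0, p, hp, hpy⟩ := hrel
            exact Or.inr ⟨p, hp, hpy⟩)
      exact Bool.coe_iff_coe.1 (hAiff.trans hBiff.symm)
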